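-- pv_equiv track=rewrite | github.com/skhan75/CoderAid | Algorithms/DynamicProgramming/count_num_of_a.py | count_a_recursive
-- ===== SOURCE A (Python) =====
-- def count_a_recursive(N):
--     # The optimal string length is N
--     # when N is smaller than 7
--     if N < 7:
--         return N
--
--     # Initialize result as max negative infinity
--     max = float('-inf')
--
--     # It is observed that we will always have 3 A's in the begining
--     # TRY ALL POSSIBLE BREAK-POINTS
--     # For any keystroke N, we need to
--     # loop from N-3 keystrokes back to
--     # 1 keystroke to find a breakpoint
--     # 'b' after which we will have Ctrl-A,
--     # Ctrl-C and then only Ctrl-V all the way.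
--     for b in range(N-3, 0, -1):
--
--          # If the breakpoint is s at b'th
--          # keystroke then the optimal string
--          # would have length
--          # (n-b-1)*screen[b-1];
--         current = (N-b-1) * count_a_recursive(b)
--
--         if current > max:
--             max = current
--
--     return max
-- ===== SOURCE B (Python) =====
-- def count_a_recursive(N):
--     # Bottom-up DP: dp[n] = best screen length achievable with n keystrokes.
--     if N < 7:
--         return N
--     dp = [0] * (N + 1)
--     for n in range(1, N + 1):
--         if n < 7:
--             dp[n] = n
--         else:
--             best = 0
--             for b in range(1, n - 2):
--                 cur = (n - b - 1) * dp[b]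
--                 if cur > best:
--                     best = cur
--             dp[n] = best
--     return dp[N]
-- ===== Notes on version B (the rewrite author's own statement) =====
-- stated objective: faster
-- what changed: Replaces the memoization-free exponential recursion with a bottom-up dynamic-programming table over 1..N, computing each breakpoint maximum once from stored subresults.
import Mathlib
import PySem

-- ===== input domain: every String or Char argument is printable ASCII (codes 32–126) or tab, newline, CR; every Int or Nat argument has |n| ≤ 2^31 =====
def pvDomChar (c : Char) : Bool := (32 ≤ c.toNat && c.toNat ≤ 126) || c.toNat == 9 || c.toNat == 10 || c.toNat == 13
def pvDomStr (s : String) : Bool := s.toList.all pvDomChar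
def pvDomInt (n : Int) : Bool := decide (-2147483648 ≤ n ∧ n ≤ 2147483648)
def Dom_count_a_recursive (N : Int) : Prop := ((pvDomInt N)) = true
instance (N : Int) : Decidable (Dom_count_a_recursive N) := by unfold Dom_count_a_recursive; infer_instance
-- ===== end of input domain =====

-- B replaces A's exponential recursion by a bottom-up DP table over 1..N (asymptotically faster).

-- ===== PORT A =====
-- 'max = float('-inf')' is ported as 'none' (Option Int); pickMax is the loop body
-- 'if current > max: max = current'. Since the loop is nonempty when N ≥ 7 the final
-- value is always 'some _', and '.getD 0' is never the -inf case.
def pickMax (mx : Option Int) (current : Int) : Option Int :=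
  match mx with
  | none => some current
  | some m => if current > m then some current else some m

def count_a_recursive (N : Int) : Int :=
  if N < 7 then N
  else
    ((PySem.List.pyRange (N - 3) 0 (-1)).attach.foldl
      (fun mx b => pickMax mx ((N - b.1 - 1) * count_a_recursive b.1))
      none).getD 0
termination_by N.toNat
decreasing_by
  have hb := (PySem.List.mem_pyRange_neg_one).mp b.2
  simp only [not_lt] at *
  omega

-- ===== PORT B =====
def altStep (dp : List Int) (n : Int) : List Int :=
  if n < 7 then dp ++ [n]
  else
    let best := (PySem.List.pyRange 1 (n - 2) 1).foldl
      (fun best b =>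
        let cur := (n - b - 1) * PySem.List.pyGetD dp b 0
        if cur > best then cur else best) 0
    dp ++ [best]

def count_a_recursive_alt (N : Int) : Int :=
  if N < 7 then N
  else
    let dp := (PySem.List.pyRange 1 (N + 1) 1).foldl altStep [0]
    PySem.List.pyGetD dp N 0

-- ===== PRECONDITION & SPEC =====
-- Pre_ excludes only the very large N on which Python A cannot return: its
-- recursion descends N, N-3, N-6, ..., so its call depth grows linearly in N and
-- overflows the interpreter's recursion limit (RecursionError) once that depth
-- exceeds the limit; N ≤ 3000 keeps the depth safely within CPython's default.
def Pre_count_a_recursive (N : Int) : Prop := N ≤ 3000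
instance (N : Int) : Decidable (Pre_count_a_recursive N) := by unfold Pre_count_a_recursive; infer_instance
def pvWitness_count_a_recursive : Int := (10)

def Spec_count_a_recursive (N : Int) (out : Int) : Prop := out = count_a_recursive_alt N
instance (N : Int) (out : Int) : Decidable (Spec_count_a_recursive N out) := by unfold Spec_count_a_recursive; infer_instance

-- ===== CLAIM (what is proved, stated in full; the proofs are below) =====
def Claim_equal_count_a_recursive : Prop := ∀ (N : Int), Dom_count_a_recursive N → Pre_count_a_recursive N → Spec_count_a_recursive N (count_a_recursive N)

-- ===== LEMMAS AND PROOFS =====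

-- running max of a projection, as both folds use it
def runMax (f : Int → Int) (l : List Int) (m : Int) : Int :=
  l.foldl (fun acc b => max acc (f b)) m

theorem if_gt_eq_max (m c : Int) : (if c > m then c else m) = max m c := by
  rcases le_total c m with h | h <;> simp [max_def] <;> omega

theorem runMax_init_max (f : Int → Int) (l : List Int) (m c : Int) :
    runMax f l (max m c) = max (runMax f l m) c := by
  induction l generalizing m with
  | nil => rfl
  | cons a t ih =>
      simp only [runMax, List.foldl_cons] at *
      rw [max_right_comm, ih]

theorem runMax_reverse (f : Int → Int) (l : List Int) (m : Int) :
    runMax f l.reverse m = runMax f l m := by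
  induction l generalizing m with
  | nil => rfl
  | cons a t ih =>
      rw [List.reverse_cons]
      have hx : runMax f (t.reverse ++ [a]) m = max (runMax f t.reverse m) (f a) := by
        simp [runMax, List.foldl_append]
      rw [hx, ih]
      show _ = runMax f t (max m (f a))
      rw [runMax_init_max]

theorem le_runMax (f : Int → Int) (l : List Int) (m : Int) : m ≤ runMax f l m := by
  induction l generalizing m with
  | nil => exact le_refl m
  | cons a t ih =>
      exact le_trans (le_max_left m (f a)) (ih (max m (f a)))

-- the Option-valued fold of port A, once the accumulator is 'some m'
theorem optFold_some (f : Int → Int) (l : List Int) (m : Int) :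
    l.foldl (fun mx b => pickMax mx (f b)) (some m) = some (runMax f l m) := by
  induction l generalizing m with
  | nil => rfl
  | cons a t ih =>
      rw [List.foldl_cons]
      have hsome : pickMax (some m) (f a) = some (max m (f a)) := by
        simp only [pickMax]
        split_ifs with h <;> simp <;> omega
      rw [hsome, ih]
      simp only [runMax, List.foldl_cons]

-- the fold step used by both ports equals a running max (pointwise congruence over members)
theorem foldl_step_eq_runMax (f : Int → Int) (l : List Int) (m : Int) :
    l.foldl (fun best b => if f b > best then f b else best) m = runMax f l m := by
  induction l generalizing m with
  | nil => rfl
  | cons a t ih =>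
      simp only [List.foldl_cons, if_gt_eq_max, runMax]

theorem runMax_congr (f g : Int → Int) (l : List Int) :
    ∀ m : Int, (∀ b ∈ l, f b = g b) → runMax f l m = runMax g l m := by
  induction l with
  | nil => intro m _; rfl
  | cons a t ih =>
      intro m h
      simp only [runMax, List.foldl_cons]
      rw [h a (by simp)]
      exact ih _ (fun b hb => h b (by simp [hb]))

-- a fold over 'attach' (used for termination in port A) equals the plain fold
theorem foldl_attach_val {α β : Type} (l : List α) (f : β → α → β) (init : β) :
    l.attach.foldl (fun acc x => f acc x.1) init = l.foldl f init := by
  calc l.attach.foldl (fun acc x => f acc x.1) init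
      = (l.attach.map Subtype.val).foldl f init := (List.foldl_map).symm
    _ = l.foldl f init := by rw [List.attach_map_subtype_val]

-- unfold A at N ≥ 7 into a running max over the descending breakpoint range
theorem count_a_recursive_ge7 (N : Int) (h : ¬ N < 7) :
    count_a_recursive N =
      runMax (fun b => (N - b - 1) * count_a_recursive b)
        (PySem.List.pyRange (N - 3 - 1) 0 (-1)) ((N - (N - 3) - 1) * count_a_recursive (N - 3)) := by
  rw [count_a_recursive]
  simp only [h, if_false]
  have hA : (PySem.List.pyRange (N - 3) 0 (-1)).attach.foldl
      (fun mx b => pickMax mx ((N - b.1 - 1) * count_a_recursive b.1)) none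
      = (PySem.List.pyRange (N - 3) 0 (-1)).foldl
      (fun mx b => pickMax mx ((N - b - 1) * count_a_recursive b)) none :=
    foldl_attach_val _ (fun mx v => pickMax mx ((N - v - 1) * count_a_recursive v)) none
  rw [hA, PySem.List.pyRange_neg_one_cons (by omega : (0:Int) < N - 3)]
  rw [List.foldl_cons]
  rw [show pickMax none ((N - (N - 3) - 1) * count_a_recursive (N - 3))
      = some ((N - (N - 3) - 1) * count_a_recursive (N - 3)) from rfl]
  rw [optFold_some (fun b => (N - b - 1) * count_a_recursive b)]
  rfl

theorem count_a_recursive_lt7 (N : Int) (h : N < 7) : count_a_recursive N = N := by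
  rw [count_a_recursive]; simp [h]

-- positivity of A's result on positive input
theorem count_a_recursive_pos (n : Nat) : ∀ N : Int, N.toNat ≤ n → 1 ≤ N → 1 ≤ count_a_recursive N := by
  induction n with
  | zero => intro N h1 h2; omega
  | succ k ih =>
      intro N h1 h2
      by_cases h7 : N < 7
      · rw [count_a_recursive_lt7 N h7]; omega
      · rw [count_a_recursive_ge7 N h7]
        have hpos : 1 ≤ (N - (N - 3) - 1) * count_a_recursive (N - 3) := by
          have := ih (N - 3) (by omega) (by omega)
          nlinarith
        exact le_trans hpos (le_runMax _ _ _)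

-- the recurrence satisfied by A, phrased over the ascending range that B uses
theorem count_a_recursive_recur (N : Int) (h : ¬ N < 7) :
    count_a_recursive N =
      runMax (fun b => (N - b - 1) * count_a_recursive b) (PySem.List.pyRange 1 (N - 2) 1) 0 := by
  have hrev : PySem.List.pyRange (N - 3) 0 (-1) = (PySem.List.pyRange 1 (N - 2) 1).reverse := by
    have hx := PySem.List.pyRange_neg_one_eq_reverse (N - 3) 0
    rw [show (0:Int) + 1 = 1 by ring, show N - 3 + 1 = N - 2 by ring] at hx
    exact hx
  rw [← runMax_reverse _ (PySem.List.pyRange 1 (N - 2) 1) 0, ← hrev,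
    PySem.List.pyRange_neg_one_cons (by omega : (0:Int) < N - 3)]
  have hfh : max 0 ((N - (N - 3) - 1) * count_a_recursive (N - 3)) =
      (N - (N - 3) - 1) * count_a_recursive (N - 3) := by
    have h1 := count_a_recursive_pos (N - 3).toNat (N - 3) (le_refl _) (by omega)
    have : 1 ≤ (N - (N - 3) - 1) * count_a_recursive (N - 3) := by nlinarith
    omega
  simp only [runMax, List.foldl_cons]
  rw [hfh, count_a_recursive_ge7 N h]
  rfl

-- dp-table invariant for B: after processing 1..n the table has length n+1
-- and entry b (1 ≤ b ≤ n) is A's value at b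
theorem dp_invariant (n : Nat) :
    ((PySem.List.pyRange 1 ((n : Int) + 1) 1).foldl altStep [0]).length = n + 1 ∧
    ∀ b : Int, 1 ≤ b → b ≤ (n : Int) →
      PySem.List.pyGetD ((PySem.List.pyRange 1 ((n : Int) + 1) 1).foldl altStep [0]) b 0
        = count_a_recursive b := by
  induction n with
  | zero =>
      rw [PySem.List.pyRange_one_eq_nil (by omega)]
      constructor
      · simp
      · intro b hb1 hb2
        have : ((0:Nat) : Int) = 0 := rfl
        omega
  | succ k ih =>
      obtain ⟨ihlen, ihget⟩ := ih
      set dp := (PySem.List.pyRange 1 ((k : Int) + 1) 1).foldl altStep [0] with hdp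
      have hsplit : PySem.List.pyRange 1 ((k : Int) + 1 + 1) 1
          = PySem.List.pyRange 1 ((k : Int) + 1) 1 ++ [(k : Int) + 1] :=
        PySem.List.pyRange_one_succ_right (by omega)
      have hgetlt : ∀ b : Int, 1 ≤ b → b ≤ (k : Int) → ∀ x : Int,
          PySem.List.pyGetD (dp ++ [x]) b 0 = count_a_recursive b := by
        intro b hb1 hb2 x
        have hb : ((b.toNat : Int)) = b := by omega
        rw [← hb, PySem.List.pyGetD_natCast, List.getD_eq_getElem?_getD,
          List.getElem?_append_left (by omega : b.toNat < dp.length),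
          ← List.getD_eq_getElem?_getD, ← PySem.List.pyGetD_natCast, hb]
        exact ihget b hb1 hb2
      have hgetlast : ∀ x : Int, PySem.List.pyGetD (dp ++ [x]) ((k : Int) + 1) 0 = x := by
        intro x
        have hb : (((k + 1 : Nat) : Int)) = (k : Int) + 1 := by push_cast; ring
        rw [← hb, PySem.List.pyGetD_natCast, List.getD_eq_getElem?_getD,
          List.getElem?_append_right (by omega : dp.length ≤ (k + 1 : Nat))]
        have hz : (k + 1 : Nat) - dp.length = 0 := by omega
        rw [hz]
        rfl
      have hstep : (PySem.List.pyRange 1 ((k : Int) + 1 + 1) 1).foldl altStep [0]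
          = altStep dp ((k : Int) + 1) := by
        rw [hsplit, List.foldl_append, List.foldl_cons, List.foldl_nil]
      have hval : altStep dp ((k : Int) + 1) = dp ++ [count_a_recursive ((k : Int) + 1)] := by
        by_cases h7 : (k : Int) + 1 < 7
        · simp only [altStep, h7, if_true]
          rw [count_a_recursive_lt7 _ h7]
        · simp only [altStep, h7, if_false]
          congr 1
          rw [foldl_step_eq_runMax (fun b => ((k : Int) + 1 - b - 1) * PySem.List.pyGetD dp b 0),
            runMax_congr _ (fun b => ((k : Int) + 1 - b - 1) * count_a_recursive b) _ 0
              (by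
                intro b hb
                have hm := (PySem.List.mem_pyRange_one).mp hb
                rw [ihget b (by omega) (by omega)]),
            ← count_a_recursive_recur _ h7]
      push_cast
      rw [hstep, hval]
      constructor
      · simp [dp] at *
        omega
      · intro b hb1 hb2
        by_cases hble : b ≤ (k : Int)
        · exact hgetlt b hb1 hble _
        · have hbe : b = (k : Int) + 1 := by omega
          rw [hbe]
          exact hgetlast _

-- ===== VERDICT (by name: the statement is the Claim_ definition above) =====
theorem count_a_recursive_spec : Claim_equal_count_a_recursive := by
  intro N _ _
  unfold Spec_count_a_recursive
  by_cases h7 : N < 7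
  · rw [count_a_recursive_lt7 N h7, count_a_recursive_alt]
    simp [h7]
  · rw [count_a_recursive_alt]
    simp only [h7, if_false]
    have hN : ((N.toNat : Int)) = N := by omega
    obtain ⟨_, hget⟩ := dp_invariant N.toNat
    rw [hN] at hget
    rw [hget N (by omega) (le_refl N)]
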